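-- pv_equiv track=rewrite | github.com/Austisc/Public-Repos | Python/EncodeDecode/bwtzip.py | EliasOmega
-- ===== SOURCE A (Python) =====
-- def EliasOmega(x:int)->str:
--      """
--      EliasOmega:func
--      input->int
--      Output:binary str
--
--      Time Complexity : O(log(x))
--      Space Complexity : O(log(x))
--      Reference: FIT 3155 Week 5 Data Compression:Elias Omega Code
--
--
--      """
--      binary=bin(x)[2:]
--      n=len(binary)
--      l=[]
--      if n==1:
--           return '1'
--      n-=1
--      while n>0:
--
--           e='0' #flip the first bit to zero
--           e+=bin(n)[3:]
--           l.append(e)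
--           n=len(e)
--           n-=1
--
--      compressed=""
--      for i in range(len(l)-1,-1,-1): #buidling elias code
--           compressed+=l[i]
--      compressed+=binary
--      return compressed
-- ===== SOURCE B (Python) =====
-- def _prefix(n: int) -> str:
--     """Elias-Omega length prefix for n, by the textbook recursion (deepest group first)."""
--     if n <= 0:
--         return ''
--     return _prefix(n.bit_length() - 1) + '0' + bin(n)[3:]
--
--
-- def EliasOmega(x: int) -> str:
--     binary = bin(x)[2:]
--     return '1' if len(binary) == 1 else _prefix(len(binary) - 1) + binary
-- ===== Notes on version B (the rewrite author's own statement) =====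
-- stated objective: simpler
-- what changed: Replaces A's while-loop that accumulates the length groups in a list (tracking the next value via the built group's length) and then concatenates them with a reverse-index loop by the textbook recursive definition of the Elias-Omega prefix, which descends via bit_length and emits the deeper groups first, so no list, no length bookkeeping and no reversal are needed.
import Mathlib
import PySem

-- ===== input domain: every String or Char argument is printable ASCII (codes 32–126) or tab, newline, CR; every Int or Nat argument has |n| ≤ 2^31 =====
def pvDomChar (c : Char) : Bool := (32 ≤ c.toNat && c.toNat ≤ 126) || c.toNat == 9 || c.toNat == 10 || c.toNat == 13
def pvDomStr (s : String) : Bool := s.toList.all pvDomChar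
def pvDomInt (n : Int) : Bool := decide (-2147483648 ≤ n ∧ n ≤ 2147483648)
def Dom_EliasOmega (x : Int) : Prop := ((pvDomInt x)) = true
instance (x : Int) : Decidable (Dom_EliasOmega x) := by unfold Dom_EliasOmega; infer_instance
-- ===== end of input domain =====

-- B replaces A's group list + reverse-index concatenation loop by the textbook recursive
-- definition of the Elias-Omega prefix, descending via bit_length (objective: simpler).

-- termination helper, cited by port A's loop: binary digit count of m is at most m
theorem toDigits_two_length_le (m : Nat) (hm : 0 < m) : (Nat.toDigits 2 m).length ≤ m :=
  Nat.toDigits_length 2 m m hm Nat.lt_two_pow_self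

-- port A's termination: the next loop value len(e)-1 drops below n
theorem eo_next_lt (n : Int) (hn : ¬ n ≤ 0) :
    ((('0' :: PySem.List.slice (PySem.Int.toBinChars0b n) (some 3) none).length : Int) - 1).toNat
      < n.toNat := by
  have h0 : ¬ n < 0 := by omega
  have hpos : 0 < n.toNat := by omega
  have hlen := toDigits_two_length_le n.toNat hpos
  simp only [PySem.Int.toBinChars0b, if_neg h0]
  have hs : PySem.List.slice ('0' :: 'b' :: Nat.toDigits 2 n.toNat) (some 3) none
      = ('0' :: 'b' :: Nat.toDigits 2 n.toNat).drop 3 := by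
    simp [pysem]
  rw [hs]
  simp only [List.length_cons, List.length_drop]
  omega

-- port B's termination: bit_length n - 1 drops below n
theorem eo_bitLength_lt (n : Int) (hn : ¬ n ≤ 0) :
    (((PySem.Int.bitLength n : Int)) - 1).toNat < n.toNat := by
  have hne : n ≠ 0 := by omega
  have h1 := PySem.Int.two_pow_bitLength_le n hne
  have h2 := Nat.lt_two_pow_self (n := PySem.Int.bitLength n - 1)
  have h3 : n.natAbs = n.toNat := by omega
  omega

-- ===== PORT A =====
-- the while loop: state (n, l), appends e = '0' + bin(n)[3:] and continues with len(e)-1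
def eoLoop (n : Int) (l : List (List Char)) : List (List Char) :=
  if h : n ≤ 0 then l
  else
    let e : List Char := '0' :: PySem.List.slice (PySem.Int.toBinChars0b n) (some 3) none
    eoLoop ((e.length : Int) - 1) (l ++ [e])
termination_by n.toNat
decreasing_by exact eo_next_lt n h

def EliasOmega (x : Int) : String :=
  let binary : List Char := PySem.List.slice (PySem.Int.toBinChars0b x) (some 2) none
  let n : Int := (binary.length : Int)
  if n == 1 then "1"
  else
    let l := eoLoop (n - 1) []
    let compressed : List Char :=
      (PySem.List.pyRange ((l.length : Int) - 1) (-1) (-1)).foldl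
        (fun acc i => acc ++ PySem.List.pyGetD l i []) []
    String.ofList (compressed ++ binary)

-- ===== PORT B =====
-- textbook recursive Elias-Omega prefix for n: deeper groups (via bit_length) first
def omegaPrefix (n : Int) : List Char :=
  if h : n ≤ 0 then []
  else
    omegaPrefix ((PySem.Int.bitLength n : Int) - 1)
      ++ '0' :: PySem.List.slice (PySem.Int.toBinChars0b n) (some 3) none
termination_by n.toNat
decreasing_by exact eo_bitLength_lt n h

def EliasOmega_alt (x : Int) : String :=
  let binary : List Char := PySem.List.slice (PySem.Int.toBinChars0b x) (some 2) none
  if (binary.length : Int) == 1 then "1"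
  else String.ofList (omegaPrefix ((binary.length : Int) - 1) ++ binary)

-- ===== PRECONDITION & SPEC =====
def Spec_EliasOmega (x : Int) (out : String) : Prop := out = EliasOmega_alt x
instance (x : Int) (out : String) : Decidable (Spec_EliasOmega x out) := by unfold Spec_EliasOmega; infer_instance

-- ===== CLAIM (what is proved, stated in full; the proofs are below) =====
def Claim_equal_EliasOmega : Prop := ∀ (x : Int), Dom_EliasOmega x → Spec_EliasOmega x (EliasOmega x)

-- ===== LEMMAS AND PROOFS =====

-- the number of binary digits core's toDigitsCore produces is bit_length n (plus the seed)
theorem toDigitsCore_two_length (f : Nat) : ∀ (n : Nat) (l : List Char), 0 < n → n < 2 ^ f →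
    (Nat.toDigitsCore 2 f n l).length = PySem.Int.bitLength (n : Int) + l.length := by
  induction f with
  | zero => intro n l hn h; omega
  | succ f ih =>
    intro n l hn h
    simp only [Nat.toDigitsCore]
    by_cases h2 : n / 2 = 0
    · have hn1 : n = 1 := by omega
      subst hn1
      simp [h2]
      have hb1 : PySem.Int.bitLength 1 = 1 := by decide
      omega
    · have hlt : n / 2 < 2 ^ f := by
        have := Nat.pow_succ 2 f
        omega
      rw [if_neg h2, ih (n / 2) _ (by omega) hlt]
      rw [PySem.Int.bitLength_natCast hn]
      simp
      omega

-- the length of A's group e = '0' + bin(n)[3:] is exactly bit_length n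
theorem eoGroup_length (n : Int) (hn : ¬ n ≤ 0) :
    ('0' :: PySem.List.slice (PySem.Int.toBinChars0b n) (some 3) none).length
      = PySem.Int.bitLength n := by
  have h0 : ¬ n < 0 := by omega
  have hpos : 0 < n.toNat := by omega
  simp only [PySem.Int.toBinChars0b, if_neg h0]
  have hs : PySem.List.slice ('0' :: 'b' :: Nat.toDigits 2 n.toNat) (some 3) none
      = ('0' :: 'b' :: Nat.toDigits 2 n.toNat).drop 3 := by
    simp [pysem]
  rw [hs]
  have hlen : (Nat.toDigits 2 n.toNat).length = PySem.Int.bitLength (n.toNat : Int) + 0 := by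
    unfold Nat.toDigits
    exact toDigitsCore_two_length (n.toNat + 1) n.toNat [] hpos
      (lt_of_lt_of_le Nat.lt_two_pow_self (Nat.pow_le_pow_right (by omega) (by omega)))
  have hc : ((n.toNat : Nat) : Int) = n := Int.toNat_of_nonneg (by omega)
  rw [hc] at hlen
  have hb : 0 < PySem.Int.bitLength n := by
    rcases Nat.eq_zero_or_pos (PySem.Int.bitLength n) with hz | hp
    · have h2 := PySem.Int.lt_two_pow_bitLength n
      rw [hz] at h2
      simp at h2
      omega
    · exact hp
  have htd : 0 < (Nat.toDigits 2 n.toNat).length := by omega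
  simp only [List.length_cons, List.length_drop]
  omega

-- A's appended groups, concatenated in reverse, are exactly B's recursive prefix
theorem eoLoop_reverse_flatten (n : Int) (l : List (List Char)) :
    (eoLoop n l).reverse.flatten = omegaPrefix n ++ l.reverse.flatten := by
  by_cases h : n ≤ 0
  · rw [eoLoop, omegaPrefix]
    simp [h]
  · rw [eoLoop, omegaPrefix]
    simp only [h, dite_false]
    rw [eoGroup_length n h, eoLoop_reverse_flatten]
    simp
termination_by n.toNat
decreasing_by exact eo_bitLength_lt n h

-- A's reverse-index building loop over l is the concatenation of l reversed
theorem revfold_eq_reverse_flatten (l : List (List Char)) :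
    (PySem.List.pyRange ((l.length : Int) - 1) (-1) (-1)).foldl
        (fun acc i => acc ++ PySem.List.pyGetD l i []) [] = l.reverse.flatten := by
  rw [PySem.List.pyRange_neg_one_eq_reverse]
  have : ((-1 : Int) + 1) = 0 := by norm_num
  rw [this]
  have h1 : ((l.length : Int) - 1 + 1) = (l.length : Int) := by ring
  rw [h1]
  rw [PySem.List.foldl_append_eq_flatMap]
  rw [List.flatMap_def, List.map_reverse, PySem.List.map_pyGetD_pyRange_zero']
  simp

-- ===== VERDICT (by name: the statement is the Claim_ definition above) =====
theorem EliasOmega_spec : Claim_equal_EliasOmega := by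
  intro x _
  unfold Spec_EliasOmega EliasOmega EliasOmega_alt
  simp only []
  by_cases h : ((PySem.List.slice (PySem.Int.toBinChars0b x) (some 2) none).length : Int) == 1
  · simp [h]
  · simp only [h]
    rw [revfold_eq_reverse_flatten, eoLoop_reverse_flatten]
    simp
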